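-- pv_equiv track=rewrite | github.com/KAIST-JongchanPark/genetic_CIT | greedy.py | choose_value
-- ===== SOURCE A (Python) =====
-- def get_covered(pi, t):
--     count = 0
--     for one in pi:
--         is_covered = True
--         for i, param in enumerate(one):
--             if param == -1:
--                 continue
--             if param != t[i]:
--                 is_covered = False
--         if is_covered:
--             count += 1
--     return count
--
-- def choose_value(i, test, pi, value):
--     cover_num = [0 for x in range(value)] # cover_num의 index는 P-i의 값
--     for x in range(value):
--         t = test[:]
--         t.append(x)
--         cover_num[x] = get_covered(pi, t)
--     add = cover_num.index(max(cover_num))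
--     test_add = test[:]
--     test_add.append(add)
--     new_pi = remove_value(test_add, pi)
--     return test_add, new_pi
--
-- def remove_value(test, pi):
--     new_pi = []
--     for comb in pi:
--         is_covered = True
--         for i, param in enumerate(comb):
--             if param == -1:
--                 continue
--             if param != test[i]:
--                 is_covered = False
--         if not is_covered:
--             new_pi.append(comb)
--     return new_pi
-- ===== SOURCE B (Python) =====
-- def _matches(comb, t):
--     # does comb (with -1 wildcards) cover the full test t?
--     return all(p == -1 or (j < len(t) and p == t[j])
--                for j, p in enumerate(comb))
--
-- def choose_value(i, test, pi, value):
--     n = len(test)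
--     base = 0            # combinations covered for every candidate value
--     bucket = {}         # combinations covered only when the new coordinate equals pn
--     for comb in pi:
--         pn = comb[n] if n < len(comb) else -1
--         ok = True
--         for j, p in enumerate(comb):
--             if j == n or p == -1:
--                 continue
--             if j > n or p != test[j]:
--                 ok = False
--                 break
--         if ok:
--             if pn == -1:
--                 base += 1
--             else:
--                 bucket[pn] = bucket.get(pn, 0) + 1
--     cover = [base + bucket.get(x, 0) for x in range(value)]
--     add = cover.index(max(cover))
--     test_add = test + [add]
--     new_pi = [comb for comb in pi if not _matches(comb, test_add)]
--     return test_add, new_pi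
-- ===== Notes on version B (the rewrite author's own statement) =====
-- stated objective: faster
-- what changed: A rescans all of pi once per candidate value (value * |pi| coverage tests); B makes a single pass over pi, classifying each combination as matching the test prefix or not and bucketing it by its value at the new coordinate (wildcards into a base count), so cover counts for all candidates come from one dictionary.
-- outside the precondition, e.g. on choose_value(0, [1], [[1, 0]], 0): A raises ValueError, B raises ValueError; on choose_value(0, [], [[5, 7]], 1): A raises IndexError, B returns ([0], [[5, 7]])
import Mathlib
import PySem

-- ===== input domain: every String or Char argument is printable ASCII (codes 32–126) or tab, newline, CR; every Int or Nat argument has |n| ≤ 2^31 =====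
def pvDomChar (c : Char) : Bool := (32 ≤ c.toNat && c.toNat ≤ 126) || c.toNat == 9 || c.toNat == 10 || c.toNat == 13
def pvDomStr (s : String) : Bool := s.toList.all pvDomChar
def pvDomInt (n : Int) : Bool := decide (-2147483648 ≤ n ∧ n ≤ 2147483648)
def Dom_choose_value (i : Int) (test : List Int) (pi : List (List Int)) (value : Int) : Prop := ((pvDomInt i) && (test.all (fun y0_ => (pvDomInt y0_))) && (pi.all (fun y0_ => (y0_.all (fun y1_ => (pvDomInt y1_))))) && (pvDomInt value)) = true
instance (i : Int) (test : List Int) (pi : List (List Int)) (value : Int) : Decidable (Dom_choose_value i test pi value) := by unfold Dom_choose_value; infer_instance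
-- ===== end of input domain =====

-- B replaces A's value × |pi| coverage rescan by ONE pass over pi that buckets each
-- combination by its value at the new coordinate (plus a wildcard base); objective: faster.

-- ===== PORT A =====
-- inner loop of get_covered / remove_value (A's two loops are token-identical, so one helper):
-- t[i] is read with List.getD _ _ 0; Python raises IndexError out of range, excluded by Pre_.
def pvCovered (t : List Int) (one : List Int) : Bool :=
  one.zipIdx.foldl
    (fun ic pj => if pj.1 = -1 then ic else if pj.1 ≠ t.getD pj.2 0 then false else ic) true

def pvGetCovered (pi : List (List Int)) (t : List Int) : Int :=
  pi.foldl (fun count one => if pvCovered t one then count + 1 else count) 0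

def pvRemoveValue (test : List Int) (pi : List (List Int)) : List (List Int) :=
  pi.foldl (fun acc comb => if pvCovered test comb then acc else acc ++ [comb]) []

def choose_value (i : Int) (test : List Int) (pi : List (List Int)) (value : Int) : List Int × List (List Int) :=
  let cover_num := (PySem.List.pyRange 0 value 1).map (fun x => pvGetCovered pi (test ++ [x]))
  -- max([]) raises ValueError (value ≤ 0), excluded by Pre_; the max is in the list so .index succeeds
  let mx := (PySem.List.max? cover_num (fun y => y)).getD 0
  let add : Int := (((PySem.List.index? cover_num mx).getD 0 : Nat) : Int)
  let test_add := test ++ [add]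
  (test_add, pvRemoveValue test_add pi)

-- ===== PORT B =====
-- Source B's inner loop over enumerate(comb) with its break, literal:
def altOk (n : Nat) (test : List Int) : List (Int × Nat) → Bool
  | [] => true
  | (p, j) :: rest =>
    if j = n ∨ p = -1 then altOk n test rest
    else if n < j ∨ p ≠ test.getD j 0 then false
    else altOk n test rest

def altMatches (comb t : List Int) : Bool :=
  comb.zipIdx.all (fun pj => pj.1 == -1 || (decide (pj.2 < t.length) && pj.1 == t.getD pj.2 0))

def choose_value_alt (i : Int) (test : List Int) (pi : List (List Int)) (value : Int) : List Int × List (List Int) :=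
  let n := test.length
  let s := pi.foldl
    (fun (s : Int × PySem.Dict Int Int) comb =>
      let pn := comb.getD n (-1)
      if altOk n test comb.zipIdx then
        if pn = -1 then (s.1 + 1, s.2)
        else (s.1, s.2.insert pn (s.2.getD pn 0 + 1))
      else s)
    (0, (PySem.Dict.empty : PySem.Dict Int Int))
  let cover := (PySem.List.pyRange 0 value 1).map (fun x => s.1 + s.2.getD x 0)
  let mx := (PySem.List.max? cover (fun y => y)).getD 0
  let add : Int := (((PySem.List.index? cover mx).getD 0 : Nat) : Int)
  let test_add := test ++ [add]
  (test_add, pi.filter (fun comb => !altMatches comb test_add))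

-- ===== PRECONDITION & SPEC =====
-- Pre_ excludes exactly the inputs where A raises: value ≤ 0 (max of the empty cover_num list
-- is a ValueError) and any combination with a non-wildcard entry past index len(test)
-- (t[i] there is an IndexError).
def Pre_choose_value (i : Int) (test : List Int) (pi : List (List Int)) (value : Int) : Prop :=
  1 ≤ value ∧ ∀ comb ∈ pi, ∀ p ∈ comb.drop (test.length + 1), p = -1
instance (i : Int) (test : List Int) (pi : List (List Int)) (value : Int) : Decidable (Pre_choose_value i test pi value) := by unfold Pre_choose_value; infer_instance

def pvWitness_choose_value : Int × List Int × List (List Int) × Int := (0, [1], [[1, 0], [-1, 2], [0, -1]], 3)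

def Spec_choose_value (i : Int) (test : List Int) (pi : List (List Int)) (value : Int) (out : List Int × List (List Int)) : Prop := out = choose_value_alt i test pi value
instance (i : Int) (test : List Int) (pi : List (List Int)) (value : Int) (out : List Int × List (List Int)) : Decidable (Spec_choose_value i test pi value out) := by unfold Spec_choose_value; infer_instance

-- ===== CLAIM (what is proved, stated in full; the proofs are below) =====
def Claim_equal_choose_value : Prop := ∀ (i : Int) (test : List Int) (pi : List (List Int)) (value : Int), Dom_choose_value i test pi value → Pre_choose_value i test pi value → Spec_choose_value i test pi value (choose_value i test pi value)

-- ===== LEMMAS AND PROOFS =====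

-- membership in a drop, by index
theorem pv_mem_drop (l : List Int) (k j : Nat) (h1 : k ≤ j) (h2 : j < l.length) :
    l[j] ∈ l.drop k := by
  rw [List.mem_iff_getElem]
  refine ⟨j - k, by simp [List.length_drop]; omega, ?_⟩
  rw [List.getElem_drop]
  congr 1
  omega

-- all over zipIdx as a ∀ over indices
theorem pv_all_zipIdx (l : List Int) (p : Int × Nat → Bool) :
    l.zipIdx.all p = true ↔ ∀ j (h : j < l.length), p (l[j], j) := by
  rw [List.all_eq_true]
  constructor
  · intro h j hj
    have hjz : j < l.zipIdx.length := by simpa using hj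
    have hz : l.zipIdx[j] = (l[j], j) := by simp [List.getElem_zipIdx]
    exact h _ (hz ▸ List.getElem_mem hjz)
  · intro h q hq
    obtain ⟨k, hk, rfl⟩ := List.getElem_of_mem hq
    simpa [List.getElem_zipIdx] using h k (by simpa using hk)

-- A's inner loop is an `all`
theorem pvCovered_eq_all (t one : List Int) :
    pvCovered t one = one.zipIdx.all (fun pj => pj.1 == -1 || pj.1 == t.getD pj.2 0) := by
  unfold pvCovered
  suffices h : ∀ (l : List (Int × Nat)) (b : Bool),
      l.foldl (fun ic pj => if pj.1 = -1 then ic else if pj.1 ≠ t.getD pj.2 0 then false else ic) b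
        = (b && l.all (fun pj => pj.1 == -1 || pj.1 == t.getD pj.2 0)) by
    simpa using h one.zipIdx true
  intro l
  induction l with
  | nil => simp
  | cons hd tl ih =>
    intro b
    simp only [List.foldl_cons, List.all_cons]
    by_cases h1 : hd.1 = -1
    · have e1 : (hd.1 == -1) = true := beq_iff_eq.mpr h1
      rw [if_pos h1, ih]
      simp only [e1, Bool.true_or, Bool.true_and]
    · by_cases h2 : hd.1 = t.getD hd.2 0
      · have e2 : (hd.1 == t.getD hd.2 0) = true := beq_iff_eq.mpr h2
        rw [if_neg h1, if_neg (fun hc => hc h2), ih]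
        simp only [e2, Bool.or_true, Bool.true_and]
      · have e1 : (hd.1 == -1) = false := beq_eq_false_iff_ne.mpr h1
        have e2 : (hd.1 == t.getD hd.2 0) = false := beq_eq_false_iff_ne.mpr h2
        rw [if_neg h1, if_pos h2, ih]
        simp only [e1, e2, Bool.false_or, Bool.false_and, Bool.and_false]

-- B's inner loop (with its break) is an `all`
theorem altOk_eq_all (n : Nat) (test : List Int) (l : List (Int × Nat)) :
    altOk n test l
      = l.all (fun pj => pj.2 == n || pj.1 == -1 || (!(decide (n < pj.2)) && pj.1 == test.getD pj.2 0)) := by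
  induction l with
  | nil => rfl
  | cons hd tl ih =>
    obtain ⟨p, j⟩ := hd
    simp only [altOk, List.all_cons]
    by_cases h1 : j = n ∨ p = -1
    · rw [if_pos h1, ih]
      rcases h1 with h1 | h1
      · simp only [beq_iff_eq.mpr h1, Bool.true_or, Bool.true_and]
      · simp only [beq_iff_eq.mpr h1, Bool.true_or, Bool.or_true, Bool.true_and]
    · have hjn : (j == n) = false := beq_eq_false_iff_ne.mpr (fun hc => h1 (Or.inl hc))
      have hp : (p == -1) = false := beq_eq_false_iff_ne.mpr (fun hc => h1 (Or.inr hc))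
      rw [if_neg h1]
      by_cases h2 : n < j ∨ p ≠ test.getD j 0
      · rw [if_pos h2]
        rcases h2 with h2 | h2
        · simp only [hjn, hp, decide_eq_true h2, Bool.not_true, Bool.false_and, Bool.false_or,
            Bool.and_false]
        · simp only [hjn, hp, beq_eq_false_iff_ne.mpr h2, Bool.and_false, Bool.false_or,
            Bool.false_and]
      · have hjle : ¬ n < j := fun hc => h2 (Or.inl hc)
        have hpe : (p == test.getD j 0) = true :=
          beq_iff_eq.mpr (not_not.mp (fun hc => h2 (Or.inr hc)))
        rw [if_neg h2, ih]
        simp only [hjn, hp, hpe, decide_eq_false hjle, Bool.not_false, Bool.true_and,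
          Bool.false_or, Bool.or_true, Bool.true_or]

-- the per-combination key lemma: A's coverage test against test ++ [x] equals
-- B's prefix test plus the bucket condition on the new coordinate
theorem pv_comb_cov (test comb : List Int) (x : Int)
    (tw : ∀ p ∈ comb.drop (test.length + 1), p = -1) :
    pvCovered (test ++ [x]) comb
      = (altOk test.length test comb.zipIdx
          && (comb.getD test.length (-1) == -1 || comb.getD test.length (-1) == x)) := by
  set n := test.length with hn
  have htw : ∀ j (h : j < comb.length), n < j → comb[j] = -1 :=
    fun j hj hnj => tw _ (pv_mem_drop comb (n + 1) j (by omega) hj)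
  have hleft : ∀ j, j < n → (test ++ [x]).getD j 0 = test.getD j 0 := by
    intro j hj
    simp [List.getD, List.getElem?_append_left (by omega : j < test.length)]
  have hat : (test ++ [x]).getD n 0 = x := by
    simp [List.getD, hn]
  rw [Bool.eq_iff_iff, Bool.and_eq_true, pvCovered_eq_all, pv_all_zipIdx, altOk_eq_all,
    pv_all_zipIdx]
  simp only [Bool.or_eq_true, beq_iff_eq, Bool.and_eq_true, Bool.not_eq_eq_eq_not,
    Bool.not_true, decide_eq_false_iff_not]
  constructor
  · intro h
    refine ⟨?_, ?_⟩
    · intro j hj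
      rcases lt_trichotomy j n with hlt | heq | hgt
      · rcases h j hj with h' | h'
        · exact Or.inl (Or.inr h')
        · exact Or.inr ⟨by omega, h'.trans (hleft j hlt)⟩
      · exact Or.inl (Or.inl heq)
      · exact Or.inl (Or.inr (htw j hj hgt))
    · by_cases hlen : n < comb.length
      · have hpn : comb.getD n (-1) = comb[n] := List.getD_eq_getElem comb (-1) hlen
        rcases h n hlen with h' | h'
        · exact Or.inl (hpn.trans h')
        · exact Or.inr (hpn.trans (h'.trans hat))
      · exact Or.inl (by simp [List.getD, List.getElem?_eq_none (by omega : comb.length ≤ n)])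
  · rintro ⟨hall, hpn⟩ j hj
    rcases lt_trichotomy j n with hlt | heq | hgt
    · rcases hall j hj with (h' | h') | h'
      · exact absurd h' (by omega)
      · exact Or.inl h'
      · exact Or.inr (h'.2.trans (hleft j hlt).symm)
    · have hpn' : comb.getD n (-1) = comb[j] := heq ▸ List.getD_eq_getElem comb (-1) (heq ▸ hj)
      rw [hpn'] at hpn
      rcases hpn with h' | h'
      · exact Or.inl h'
      · exact Or.inr (h'.trans (heq ▸ hat).symm)
    · exact Or.inl (htw j hj hgt)

-- A's counting loop is countP
theorem pvGetCovered_eq_countP (pi : List (List Int)) (t : List Int) :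
    pvGetCovered pi t = (pi.countP (fun one => pvCovered t one) : Int) := by
  simpa [pvGetCovered] using PySem.List.foldl_count_if (fun one => pvCovered t one) pi 0

-- B's single pass: base + bucket[x] counts exactly the bucketed predicate
theorem pv_bucket_count (n : Nat) (test : List Int) (x : Int) (pi : List (List Int)) :
    ∀ (s : Int × PySem.Dict Int Int),
      (let r := pi.foldl
        (fun (s : Int × PySem.Dict Int Int) comb =>
          let pn := comb.getD n (-1)
          if altOk n test comb.zipIdx then
            if pn = -1 then (s.1 + 1, s.2)
            else (s.1, s.2.insert pn (s.2.getD pn 0 + 1))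
          else s) s
       r.1 + r.2.getD x 0)
      = s.1 + s.2.getD x 0
        + (pi.countP (fun comb =>
            altOk n test comb.zipIdx
              && (comb.getD n (-1) == -1 || comb.getD n (-1) == x)) : Int) := by
  induction pi with
  | nil => intro s; simp
  | cons comb tl ih =>
    intro s
    simp only [List.foldl_cons, List.countP_cons]
    by_cases hok : altOk n test comb.zipIdx
    · by_cases hpn : comb.getD n (-1) = -1
      · rw [if_pos hok, if_pos hpn, ih]
        have hp : (altOk n test comb.zipIdx
            && (comb.getD n (-1) == -1 || comb.getD n (-1) == x)) = true := by
          rw [hok, beq_iff_eq.mpr hpn, Bool.true_or, Bool.true_and]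
        rw [hp, if_pos rfl]
        push_cast
        ring
      · by_cases hx : comb.getD n (-1) = x
        · rw [if_pos hok, if_neg hpn, ih]
          have hp : (altOk n test comb.zipIdx
              && (comb.getD n (-1) == -1 || comb.getD n (-1) == x)) = true := by
            rw [hok, beq_iff_eq.mpr hx, Bool.or_true, Bool.true_and]
          rw [hp, if_pos rfl, hx, PySem.Dict.getD_insert_self]
          push_cast
          ring
        · rw [if_pos hok, if_neg hpn, ih,
            PySem.Dict.getD_insert_of_ne s.2 _ _ (fun h => hx h.symm)]
          have hp : (altOk n test comb.zipIdx
              && (comb.getD n (-1) == -1 || comb.getD n (-1) == x)) = false := by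
            rw [beq_eq_false_iff_ne.mpr hpn, beq_eq_false_iff_ne.mpr hx, Bool.false_or,
              Bool.and_false]
          rw [hp]
          simp
    · rw [if_neg hok, ih]
      have hp : (altOk n test comb.zipIdx
          && (comb.getD n (-1) == -1 || comb.getD n (-1) == x)) = false := by
        rw [Bool.eq_false_iff.mpr hok, Bool.false_and]
      rw [hp]
      simp

-- A's append loop in remove_value is a filter
theorem pvRemoveValue_eq_filter (test : List Int) (pi : List (List Int)) :
    pvRemoveValue test pi = pi.filter (fun comb => !pvCovered test comb) := by
  have hfun : (fun (acc : List (List Int)) comb =>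
      if pvCovered test comb then acc else acc ++ [comb])
      = (fun acc comb => if (!pvCovered test comb) then acc ++ [comb] else acc) := by
    funext acc comb
    by_cases h : pvCovered test comb <;> simp [h]
  rw [pvRemoveValue, hfun]
  simpa using
    PySem.List.foldl_append_if_eq_filter (fun comb => !pvCovered test comb)
      (l := pi) (acc := ([] : List (List Int)))

-- the two filter predicates agree on tail-wildcard combinations (t has length len(test)+1)
theorem pv_filter_pred (test comb t : List Int) (ht : t.length = test.length + 1)
    (tw : ∀ p ∈ comb.drop (test.length + 1), p = -1) :
    pvCovered t comb = altMatches comb t := by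
  have htw : ∀ j (h : j < comb.length), test.length < j → comb[j] = -1 :=
    fun j hj hnj => tw _ (pv_mem_drop comb (test.length + 1) j (by omega) hj)
  rw [Bool.eq_iff_iff, pvCovered_eq_all, pv_all_zipIdx, altMatches, pv_all_zipIdx]
  simp only [Bool.or_eq_true, beq_iff_eq, Bool.and_eq_true, decide_eq_true_eq]
  constructor
  · intro h j hj
    by_cases hgt : test.length < j
    · exact Or.inl (htw j hj hgt)
    · rcases h j hj with h' | h'
      · exact Or.inl h'
      · exact Or.inr ⟨by omega, h'⟩
  · intro h j hj
    rcases h j hj with h' | h'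
    · exact Or.inl h'
    · exact Or.inr h'.2

-- ===== VERDICT (by name: the statement is the Claim_ definition above) =====
theorem choose_value_spec : Claim_equal_choose_value := by
  intro i test pi value _hdom hpre
  obtain ⟨hval, htw⟩ := hpre
  unfold Spec_choose_value choose_value choose_value_alt
  -- the two cover lists are equal
  have hcover : (PySem.List.pyRange 0 value 1).map (fun x => pvGetCovered pi (test ++ [x]))
      = (PySem.List.pyRange 0 value 1).map (fun x =>
          (pi.foldl
            (fun (s : Int × PySem.Dict Int Int) comb =>
              let pn := comb.getD test.length (-1)
              if altOk test.length test comb.zipIdx then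
                if pn = -1 then (s.1 + 1, s.2)
                else (s.1, s.2.insert pn (s.2.getD pn 0 + 1))
              else s)
            (0, (PySem.Dict.empty : PySem.Dict Int Int))).1
          + (pi.foldl
            (fun (s : Int × PySem.Dict Int Int) comb =>
              let pn := comb.getD test.length (-1)
              if altOk test.length test comb.zipIdx then
                if pn = -1 then (s.1 + 1, s.2)
                else (s.1, s.2.insert pn (s.2.getD pn 0 + 1))
              else s)
            (0, (PySem.Dict.empty : PySem.Dict Int Int))).2.getD x 0) := by
    apply List.map_congr_left
    intro x _hxmem
    rw [pvGetCovered_eq_countP]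
    have := pv_bucket_count test.length test x pi (0, (PySem.Dict.empty : PySem.Dict Int Int))
    simp only at this
    rw [this]
    have hcnt : pi.countP (fun one => pvCovered (test ++ [x]) one)
        = pi.countP (fun comb =>
            altOk test.length test comb.zipIdx
              && (comb.getD test.length (-1) == -1 || comb.getD test.length (-1) == x)) := by
      apply List.countP_congr
      intro comb hcomb
      rw [pv_comb_cov test comb x (htw comb hcomb)]
    rw [hcnt]
    simp
  simp only [hcover]
  -- with equal cover lists, mx / add / test_add coincide definitionally; the filters agree
  refine Prod.ext rfl ?_
  rw [pvRemoveValue_eq_filter]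
  apply List.filter_congr
  intro comb hcomb
  rw [pv_filter_pred _ _ _ (by simp) (htw comb hcomb)]
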